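-- pv_equiv track=rewrite | github.com/savanto/bio | mmch.py | mmch
-- ===== SOURCE A (Python) =====
-- def mmch(s):
--   """
--   Counts G, C, A, U content of s and returns the total possible number of
--   maximum matchings of basepair edges.
--   """
--   # Count base pairs
--   count = {'A': 0, 'C': 0, 'G': 0, 'U': 0}
--   for base in s:
--     count[base] += 1
--   a = list(range(count['A'], 0, -1))
--   u = list(range(count['U'], 0, -1))
--   au = a[:len(u)] if len(u) < len(a) else u[:len(a)]
--   g = list(range(count['G'], 0, -1))
--   c = list(range(count['C'], 0, -1))
--   gc = g[:len(c)] if len(c) < len(g) else c[:len(g)]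
--   au_fact = 1
--   gc_fact = 1
--   for i in au:
--     au_fact *= i
--   for i in gc:
--     gc_fact *= i
--   return au_fact * gc_fact
-- ===== SOURCE B (Python) =====
-- def _fact(n):
--     """Plain factorial: 1 * 2 * ... * n."""
--     f = 1
--     for i in range(2, n + 1):
--         f *= i
--     return f
--
-- def mmch(s):
--   """
--   Counts G, C, A, U content of s and returns the total possible number of
--   maximum matchings of basepair edges.
--   """
--   # Count base pairs
--   count = {'A': 0, 'C': 0, 'G': 0, 'U': 0}
--   for base in s:
--     count[base] += 1
--   # Each pair contributes the falling factorial max!/(max-min)!, computed as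
--   # an exact quotient of two full factorials instead of a truncated product.
--   au = _fact(max(count['A'], count['U'])) // _fact(abs(count['A'] - count['U']))
--   cg = _fact(max(count['G'], count['C'])) // _fact(abs(count['G'] - count['C']))
--   return au * cg
-- ===== Notes on version B (the rewrite author's own statement) =====
-- stated objective: alternative
-- what changed: B keeps the per-character count-dict loop (so non-ACGU input still raises KeyError) but replaces A's range-list/slice/truncated-product machinery by the closed form: each pair contributes the falling factorial computed as an exact quotient of two full factorials, fact(max)//fact(|diff|).
import Mathlib
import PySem

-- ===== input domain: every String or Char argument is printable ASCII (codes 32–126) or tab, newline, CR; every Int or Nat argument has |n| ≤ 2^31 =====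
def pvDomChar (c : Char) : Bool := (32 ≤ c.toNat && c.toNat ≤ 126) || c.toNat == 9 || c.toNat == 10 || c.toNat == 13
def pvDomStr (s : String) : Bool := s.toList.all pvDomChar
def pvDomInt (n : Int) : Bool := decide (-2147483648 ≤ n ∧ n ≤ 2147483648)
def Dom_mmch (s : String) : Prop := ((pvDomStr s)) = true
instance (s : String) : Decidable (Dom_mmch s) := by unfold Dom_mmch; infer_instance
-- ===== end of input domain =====

-- B keeps A's per-character count-dict loop (non-ACGU input still raises KeyError) but
-- replaces the range-list/slice/truncated-product machinery by the closed form
-- fact(max) // fact(|difference|) per pair (objective: alternative).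

-- ===== PORT A =====
def mmch (s : String) : Int :=
  let count0 : PySem.Dict Char Int := PySem.Dict.ofList [('A', 0), ('C', 0), ('G', 0), ('U', 0)]
  let count := s.toList.foldl (fun (d : PySem.Dict Char Int) base =>
    match PySem.Dict.get? d base with
    | some v => PySem.Dict.insert d base (v + 1)
    | none   => d)   -- none = Python's KeyError on count[base]; excluded by Pre_mmch
    count0
  let a := PySem.List.pyRange (count.getD 'A' 0) 0 (-1)
  let u := PySem.List.pyRange (count.getD 'U' 0) 0 (-1)
  let au := if u.length < a.length then PySem.List.slice a none (some (u.length : Int))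
            else PySem.List.slice u none (some (a.length : Int))
  let g := PySem.List.pyRange (count.getD 'G' 0) 0 (-1)
  let c := PySem.List.pyRange (count.getD 'C' 0) 0 (-1)
  let gc := if c.length < g.length then PySem.List.slice g none (some (c.length : Int))
            else PySem.List.slice c none (some (g.length : Int))
  let au_fact := au.foldl (fun acc i => acc * i) 1
  let gc_fact := gc.foldl (fun acc i => acc * i) 1
  au_fact * gc_fact

-- ===== PORT B =====
-- helper _fact of Source B: f = 1; for i in range(2, n + 1): f *= i; return f
def pvFact (n : Int) : Int :=
  (PySem.List.pyRange 2 (n + 1) 1).foldl (fun f i => f * i) 1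

def mmch_alt (s : String) : Int :=
  let count0 : PySem.Dict Char Int := PySem.Dict.ofList [('A', 0), ('C', 0), ('G', 0), ('U', 0)]
  let count := s.toList.foldl (fun (d : PySem.Dict Char Int) base =>
    match PySem.Dict.get? d base with
    | some v => PySem.Dict.insert d base (v + 1)
    | none   => d)   -- none = Python's KeyError on count[base]; excluded by Pre_mmch
    count0
  let au := PySem.Int.floordiv (pvFact (max (count.getD 'A' 0) (count.getD 'U' 0)))
                               (pvFact |count.getD 'A' 0 - count.getD 'U' 0|)
  let gc := PySem.Int.floordiv (pvFact (max (count.getD 'G' 0) (count.getD 'C' 0)))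
                               (pvFact |count.getD 'G' 0 - count.getD 'C' 0|)
  au * gc

-- ===== PRECONDITION & SPEC =====
-- Pre_ excludes exactly the strings containing a character other than A/C/G/U,
-- on which A (and B) raises KeyError; A returns on every string of A/C/G/U only.
def Pre_mmch (s : String) : Prop :=
  (s.toList.all (fun c => c == 'A' || c == 'C' || c == 'G' || c == 'U')) = true
instance (s : String) : Decidable (Pre_mmch s) := by unfold Pre_mmch; infer_instance

def pvWitness_mmch : String := "GAUC"

def Spec_mmch (s : String) (out : Int) : Prop := out = mmch_alt s
instance (s : String) (out : Int) : Decidable (Spec_mmch s out) := by unfold Spec_mmch; infer_instance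

-- ===== CLAIM (what is proved, stated in full; the proofs are below) =====
def Claim_equal_mmch : Prop := ∀ (s : String), Dom_mmch s → Pre_mmch s → Spec_mmch s (mmch s)

-- ===== LEMMAS AND PROOFS =====

-- On ACGU-only input the get?/insert loop is the standard counting loop.
lemma pv_dict_loop (l : List Char) (hl : ∀ x ∈ l, x = 'A' ∨ x = 'C' ∨ x = 'G' ∨ x = 'U') :
    ∀ (d : PySem.Dict Char Int),
      (d.get? 'A').isSome → (d.get? 'C').isSome → (d.get? 'G').isSome → (d.get? 'U').isSome →
    l.foldl (fun (d : PySem.Dict Char Int) base =>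
      match PySem.Dict.get? d base with
      | some v => PySem.Dict.insert d base (v + 1)
      | none   => d) d =
    l.foldl (fun (d : PySem.Dict Char Int) x => d.insert x (d.getD x 0 + 1)) d := by
  induction l with
  | nil => intro d _ _ _ _; rfl
  | cons x t ih =>
    intro d hA hC hG hU
    have hx := hl x List.mem_cons_self
    have ht : ∀ y ∈ t, y = 'A' ∨ y = 'C' ∨ y = 'G' ∨ y = 'U' :=
      fun y hy => hl y (List.mem_cons_of_mem _ hy)
    have hsome : (d.get? x).isSome := by rcases hx with h | h | h | h <;> subst h <;> assumption
    obtain ⟨v, hv⟩ := Option.isSome_iff_exists.mp hsome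
    have hstep : (match PySem.Dict.get? d x with
        | some v => PySem.Dict.insert d x (v + 1)
        | none   => d) = d.insert x (d.getD x 0 + 1) := by
      rw [hv, PySem.Dict.getD_of_get?_eq_some d 0 hv]
    have hpres : ∀ (k : Char), (d.get? k).isSome →
        ((d.insert x (d.getD x 0 + 1)).get? k).isSome := by
      intro k hk
      rw [PySem.Dict.get?_insert]
      split <;> simp_all
    simp only [List.foldl_cons, hstep]
    exact ih ht _ (hpres 'A' hA) (hpres 'C' hC) (hpres 'G' hG) (hpres 'U' hU)

-- Source B's ascending factorial loop computes n!.
lemma pv_fact_eq (n : Nat) : pvFact (n : Int) = (n.factorial : Int) := by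
  induction n with
  | zero =>
    simp [pvFact, PySem.List.pyRange_one_eq_nil (by norm_num : (1:Int) ≤ 2)]
  | succ m ih =>
    rcases Nat.eq_zero_or_pos m with hm | hm
    · subst hm
      simp [pvFact, PySem.List.pyRange_one_eq_nil (by norm_num : (2:Int) ≤ 2)]
    · have h2 : (2:Int) ≤ (m:Int) + 1 := by omega
      have hcast : ((m + 1 : Nat) : Int) + 1 = ((m:Int) + 1) + 1 := by push_cast; ring
      simp only [pvFact] at ih ⊢
      rw [hcast, PySem.List.pyRange_one_succ_right h2, List.foldl_append, ih]
      simp only [List.foldl_cons, List.foldl_nil]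
      push_cast [Nat.factorial_succ]
      ring

-- A's truncated descending product is the descending factorial.
lemma pv_take_prod (k : Nat) : ∀ (M : Nat), k ≤ M → ∀ (r : Int),
    ((PySem.List.pyRange (M:Int) 0 (-1)).take k).foldl (fun acc i => acc * i) r =
    r * (M.descFactorial k : Int) := by
  induction k with
  | zero => intro M _ r; simp
  | succ j ih =>
    intro M hM r
    obtain ⟨M', rfl⟩ : ∃ M', M = M' + 1 := ⟨M - 1, by omega⟩
    have hpos : (0:Int) < ((M' + 1 : Nat) : Int) := by positivity
    rw [PySem.List.pyRange_neg_one_cons hpos, List.take_succ_cons, List.foldl_cons]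
    have : ((M' + 1 : Nat) : Int) - 1 = (M' : Int) := by push_cast; ring
    rw [this, ih M' (by omega)]
    rw [Nat.succ_descFactorial_succ]
    push_cast
    ring

-- One basepair family: A's branch-slice-product equals B's factorial quotient.
lemma pv_pair (x y : Nat) :
    (if (PySem.List.pyRange (y:Int) 0 (-1)).length < (PySem.List.pyRange (x:Int) 0 (-1)).length
     then PySem.List.slice (PySem.List.pyRange (x:Int) 0 (-1)) none
            (some ((PySem.List.pyRange (y:Int) 0 (-1)).length : Int))
     else PySem.List.slice (PySem.List.pyRange (y:Int) 0 (-1)) none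
            (some ((PySem.List.pyRange (x:Int) 0 (-1)).length : Int))).foldl
      (fun acc i => acc * i) 1 =
    PySem.Int.floordiv (pvFact (max (x:Int) (y:Int))) (pvFact |(x:Int) - (y:Int)|) := by
  have hlx : (PySem.List.pyRange (x:Int) 0 (-1)).length = x := by
    rw [PySem.List.length_pyRange_neg_one]; omega
  have hly : (PySem.List.pyRange (y:Int) 0 (-1)).length = y := by
    rw [PySem.List.length_pyRange_neg_one]; omega
  rw [hlx, hly]
  by_cases h : y < x
  · have hmax : max (x:Int) (y:Int) = ((x:Nat):Int) := by omega
    have habs : |(x:Int) - (y:Int)| = ((x - y : Nat) : Int) := by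
      rw [abs_of_nonneg (by omega)]; omega
    rw [if_pos h, PySem.List.slice_to_natCast, pv_take_prod y x (by omega) 1, hmax, habs,
        pv_fact_eq, pv_fact_eq, PySem.Int.floordiv_natCast,
        Nat.descFactorial_eq_div (by omega : y ≤ x)]
    simp
  · have hle : x ≤ y := by omega
    have hmax : max (x:Int) (y:Int) = ((y:Nat):Int) := by omega
    have habs : |(x:Int) - (y:Int)| = ((y - x : Nat) : Int) := by
      rw [abs_of_nonpos (by omega)]; omega
    rw [if_neg h, PySem.List.slice_to_natCast, pv_take_prod x y hle 1, hmax, habs,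
        pv_fact_eq, pv_fact_eq, PySem.Int.floordiv_natCast,
        Nat.descFactorial_eq_div hle]
    simp

theorem pv_main (s : String) (h : Pre_mmch s) : mmch s = mmch_alt s := by
  have h' : ∀ c ∈ s.toList, c = 'A' ∨ c = 'C' ∨ c = 'G' ∨ c = 'U' := by
    intro c hc
    have := List.all_eq_true.mp h c hc
    simp only [Bool.or_eq_true, beq_iff_eq] at this
    tauto
  simp only [mmch, mmch_alt]
  rw [pv_dict_loop s.toList h' _ (by decide) (by decide) (by decide) (by decide)]
  have hg : ∀ c : Char,
      ((s.toList.foldl (fun d x => d.insert x (d.getD x 0 + 1))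
        (PySem.Dict.ofList [('A', 0), ('C', 0), ('G', 0), ('U', 0)])).getD c 0) =
      ((PySem.Dict.ofList [('A', (0:Int)), ('C', 0), ('G', 0), ('U', 0)]).getD c 0
        + (s.toList.count c : Int)) :=
    fun c => PySem.Dict.getD_foldl_insert_add_one s.toList _ c
  have hA := hg 'A'; have hC := hg 'C'; have hG := hg 'G'; have hU := hg 'U'
  rw [show ((PySem.Dict.ofList [('A', (0:Int)), ('C', 0), ('G', 0), ('U', 0)]).getD 'A' 0) = 0 from by decide] at hA
  rw [show ((PySem.Dict.ofList [('A', (0:Int)), ('C', 0), ('G', 0), ('U', 0)]).getD 'C' 0) = 0 from by decide] at hC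
  rw [show ((PySem.Dict.ofList [('A', (0:Int)), ('C', 0), ('G', 0), ('U', 0)]).getD 'G' 0) = 0 from by decide] at hG
  rw [show ((PySem.Dict.ofList [('A', (0:Int)), ('C', 0), ('G', 0), ('U', 0)]).getD 'U' 0) = 0 from by decide] at hU
  rw [hA, hC, hG, hU]
  simp only [zero_add]
  rw [pv_pair (s.toList.count 'A') (s.toList.count 'U'),
      pv_pair (s.toList.count 'G') (s.toList.count 'C')]

-- ===== VERDICT (by name: the statement is the Claim_ definition above) =====
theorem mmch_spec : Claim_equal_mmch := by
  intro s _ hp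
  unfold Spec_mmch
  exact pv_main s hp
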